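-- pv_equiv track=rewrite | github.com/garrett4wade/OpenRLHF | ts_mlsys25/launch.py | log2_generator
-- ===== SOURCE A (Python) =====
-- def log2_generator(limit, reversed=False):
--     assert limit & (limit - 1) == 0
--     num = 1 if not reversed else limit
--     if not reversed:
--         while num <= limit:
--             yield num
--             num *= 2
--     else:
--         while num >= 1:
--             yield num
--             num //= 2
-- ===== SOURCE B (Python) =====
-- def log2_generator(limit, reversed=False):
--     assert limit & (limit - 1) == 0
--     powers = [2 ** i for i in range(limit.bit_length())]
--     if reversed:
--         powers.reverse()
--     yield from powers
-- ===== Notes on version B (the rewrite author's own statement) =====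
-- stated objective: simpler
-- what changed: Replaces A's two while-loops with a mutating multiply/divide accumulator by a staged construction: build the full list of powers once by exponent (range over bit_length), then reverse it in place for the descending case.
import Mathlib
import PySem

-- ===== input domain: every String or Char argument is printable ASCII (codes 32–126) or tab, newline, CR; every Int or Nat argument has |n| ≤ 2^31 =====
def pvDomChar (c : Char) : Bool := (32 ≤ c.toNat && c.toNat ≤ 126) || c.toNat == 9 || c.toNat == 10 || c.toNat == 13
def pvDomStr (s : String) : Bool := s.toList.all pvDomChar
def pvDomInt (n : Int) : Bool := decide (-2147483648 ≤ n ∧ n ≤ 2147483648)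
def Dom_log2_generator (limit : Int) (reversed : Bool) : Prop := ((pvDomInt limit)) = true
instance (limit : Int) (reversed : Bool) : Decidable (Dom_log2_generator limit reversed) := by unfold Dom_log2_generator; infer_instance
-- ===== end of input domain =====

-- B replaces A's two accumulator while-loops by a staged construction: build the list of
-- powers once by exponent, then reverse it in place for the descending case (simpler).
-- Return-value equivalence only (generators are ported as the list of yielded values).

-- ===== PORT A =====
-- `while num <= limit: yield num; num *= 2`  (the `1 <= num` conjunct only makes the
-- recursion total; it is an invariant of A's loop, which starts at num = 1)
def pvLoopF (limit num : Int) : List Int :=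
  if h : 1 ≤ num ∧ num ≤ limit then num :: pvLoopF limit (num * 2) else []
  termination_by (limit + 1 - num).toNat
  decreasing_by omega

-- `while num >= 1: yield num; num //= 2`
def pvLoopR (num : Int) : List Int :=
  if h : 1 ≤ num then num :: pvLoopR (PySem.Int.floordiv num 2) else []
  termination_by num.toNat
  decreasing_by
    rw [PySem.Int.floordiv_eq_ediv_of_pos (by omega)]; omega

def log2_generator (limit : Int) (reversed : Bool) : List Int :=
  if !reversed then pvLoopF limit 1 else pvLoopR limit

-- ===== PORT B =====
-- powers = [2 ** i for i in range(limit.bit_length())]; if reversed: powers.reverse(); yield from powers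
def log2_generator_alt (limit : Int) (reversed : Bool) : List Int :=
  let powers := (List.range (PySem.Int.bitLength limit)).map (fun i => (2:Int) ^ i)
  let powers := if reversed then powers.reverse else powers
  powers

-- ===== PRECONDITION & SPEC =====
-- Pre_: exactly the inputs on which A's assert `limit & (limit - 1) == 0` passes
-- (Python's `&` of two negative ints is negative, so no negative limit passes).
def Pre_log2_generator (limit : Int) (reversed : Bool) : Prop :=
  0 ≤ limit ∧ limit.toNat &&& (limit.toNat - 1) = 0
instance (limit : Int) (reversed : Bool) : Decidable (Pre_log2_generator limit reversed) := by
  unfold Pre_log2_generator; infer_instance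
def pvWitness_log2_generator : Int × Bool := (8, true)

def Spec_log2_generator (limit : Int) (reversed : Bool) (out : List Int) : Prop := out = log2_generator_alt limit reversed
instance (limit : Int) (reversed : Bool) (out : List Int) : Decidable (Spec_log2_generator limit reversed out) := by unfold Spec_log2_generator; infer_instance

-- ===== CLAIM (what is proved, stated in full; the proofs are below) =====
def Claim_equal_log2_generator : Prop := ∀ (limit : Int) (reversed : Bool), Dom_log2_generator limit reversed → Pre_log2_generator limit reversed → Spec_log2_generator limit reversed (log2_generator limit reversed)

-- ===== LEMMAS AND PROOFS =====

-- n & (n-1) == 0 characterises 0 and the powers of two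
lemma pv_pow_of_and_pred : ∀ (n : Nat), n &&& (n - 1) = 0 → n = 0 ∨ ∃ k, n = 2 ^ k := by
  intro n
  induction n using Nat.strong_induction_on with
  | _ n ih =>
    intro h
    rcases Nat.eq_zero_or_pos n with rfl | hpos
    · exact Or.inl rfl
    rcases Nat.lt_or_ge n 2 with h2 | h2
    · exact Or.inr ⟨0, by omega⟩
    -- n ≥ 2
    rcases Nat.even_or_odd n with he | ho
    · -- even: n = 2 * (n/2), and (n/2) &&& (n/2 - 1) = 0
      obtain ⟨m, hm⟩ := he
      have hmn : m = n / 2 := by omega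
      have hkey : m &&& (m - 1) = 0 := by
        apply Nat.eq_of_testBit_eq
        intro i
        have hb : (n &&& (n - 1)).testBit (i + 1) = false := by
          rw [h]; exact Nat.zero_testBit _
        rw [Nat.testBit_and, Nat.testBit_add_one, Nat.testBit_add_one,
          show n / 2 = m from hmn.symm, show (n - 1) / 2 = m - 1 from by omega] at hb
        simp [Nat.testBit_and, hb]
      rcases ih m (by omega) hkey with rfl | ⟨k, rfl⟩
      · omega
      · exact Or.inr ⟨k + 1, by rw [pow_succ]; omega⟩
    · -- odd n ≥ 2: impossible, since all bits of n/2 would have to vanish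
      obtain ⟨m, hm⟩ := ho
      have hmz : m = 0 := by
        apply Nat.eq_of_testBit_eq
        intro i
        have hb : (n &&& (n - 1)).testBit (i + 1) = false := by
          rw [h]; exact Nat.zero_testBit _
        rw [Nat.testBit_and, Nat.testBit_add_one, Nat.testBit_add_one,
          show n / 2 = m from by omega, show (n - 1) / 2 = m from by omega] at hb
        simpa using hb
      omega

lemma pv_bitLength_nat_two_pow (k : Nat) :
    PySem.Int.bitLength ((2 ^ k : Nat) : Int) = k + 1 := by
  induction k with
  | zero => decide
  | succ k ih =>
      rw [PySem.Int.bitLength_natCast (by positivity)]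
      have h2 : 2 ^ (k + 1) / 2 = 2 ^ k := by
        rw [pow_succ, Nat.mul_div_cancel _ (by norm_num)]
      rw [h2, ih]

lemma pv_bitLength_two_pow (k : Nat) :
    PySem.Int.bitLength ((2:Int) ^ k) = k + 1 := by
  have : ((2:Int) ^ k) = ((2 ^ k : Nat) : Int) := by push_cast; ring
  rw [this, pv_bitLength_nat_two_pow]

lemma pv_loopF_pow (d : Nat) : ∀ (j : Nat),
    pvLoopF ((2:Int) ^ (j + d)) ((2:Int) ^ j)
      = (List.range (d + 1)).map (fun i => (2:Int) ^ (j + i)) := by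
  induction d with
  | zero =>
      intro j
      have h0 : (0:Int) < 2 ^ j := by positivity
      simp only [Nat.add_zero]
      rw [pvLoopF, dif_pos ⟨by omega, le_refl _⟩, pvLoopF,
        dif_neg (by rintro ⟨-, h2⟩; omega)]
      simp
  | succ d ih =>
      intro j
      have h0 : (0:Int) < 2 ^ j := by positivity
      have hle : (2:Int) ^ j ≤ 2 ^ (j + (d + 1)) :=
        pow_le_pow_right₀ (by norm_num) (by omega)
      rw [pvLoopF, dif_pos ⟨by omega, hle⟩,
        show (2:Int) ^ j * 2 = 2 ^ (j + 1) from (pow_succ 2 j).symm,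
        show j + (d + 1) = (j + 1) + d from by omega, ih (j + 1)]
      conv_rhs => rw [List.range_succ_eq_map, List.map_cons, List.map_map]
      congr 1
      apply List.map_congr_left
      intro a _
      simp only [Function.comp_apply]
      congr 1
      omega

lemma pv_loopR_pow (k : Nat) :
    pvLoopR ((2:Int) ^ k)
      = (((List.range (k + 1)).map (fun i => (2:Int) ^ i)).reverse) := by
  induction k with
  | zero =>
      rw [pvLoopR, dif_pos (by norm_num), pvLoopR]
      norm_num [PySem.Int.floordiv_eq_ediv_of_pos]
  | succ k ih =>
      rw [pvLoopR]
      have hpos : (0:Int) < 2 ^ (k + 1) := by positivity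
      rw [dif_pos (by omega)]
      have hdiv : PySem.Int.floordiv ((2:Int) ^ (k + 1)) 2 = (2:Int) ^ k := by
        rw [PySem.Int.floordiv_eq_ediv_of_pos (by norm_num), pow_succ,
          Int.mul_ediv_cancel _ (by norm_num)]
      rw [hdiv, ih]
      simp [List.range_succ]

-- ===== VERDICT (by name: the statement is the Claim_ definition above) =====
theorem log2_generator_spec : Claim_equal_log2_generator := by
  intro limit reversed _ hpre
  obtain ⟨hnn, hand⟩ := hpre
  unfold Spec_log2_generator log2_generator log2_generator_alt
  rcases pv_pow_of_and_pred _ hand with h0 | ⟨k, hk⟩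
  · have : limit = 0 := by omega
    subst this
    cases reversed <;> simp [pvLoopF, pvLoopR, PySem.Int.bitLength_zero]
  · have hlim : limit = (2:Int) ^ k := by
      have h1 : ((limit.toNat : Nat) : Int) = limit := Int.toNat_of_nonneg hnn
      rw [hk] at h1
      push_cast at h1
      omega
    subst hlim
    rw [pv_bitLength_two_pow]
    cases reversed
    · simp only [Bool.not_false, if_pos]
      have := pv_loopF_pow k 0
      simpa using this
    · simp only [Bool.not_true, Bool.false_eq_true, ite_false, if_pos]
      rw [pv_loopR_pow]
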